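-- pv_equiv track=rewrite | github.com/Mansi249/Vandoot_project | esp32/train_esp32_mobilenet.py | hex_to_c_array
-- ===== SOURCE A (Python) =====
-- def hex_to_c_array(model_data, model_name="vandoot_model"):
--
--     c_str = ""
--     c_str += "#include <cstdint>\n\n"
--     c_str += f"unsigned int {model_name}_len = {len(model_data)};\n"
--     c_str += f"unsigned char {model_name}[] = {{\n"
--
--     hex_array = []
--
--     for i, val in enumerate(model_data):
--         hex_array.append(f"0x{val:02x}")
--
--         if (i + 1) % 12 == 0:
--             c_str += "  " + ", ".join(hex_array) + ",\n"
--             hex_array = []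
--
--     if hex_array:
--         c_str += "  " + ", ".join(hex_array) + "\n"
--
--     c_str += "};\n"
--
--     return c_str
-- ===== SOURCE B (Python) =====
-- def hex_to_c_array(model_data, model_name="vandoot_model"):
--     hexes = ["0x{:02x}".format(val) for val in model_data]
--     out = ["#include <cstdint>\n\n",
--            f"unsigned int {model_name}_len = {len(model_data)};\n",
--            f"unsigned char {model_name}[] = {{\n"]
--     for i in range(0, len(hexes), 12):
--         chunk = hexes[i:i + 12]
--         out.append("  " + ", ".join(chunk) + (",\n" if len(chunk) == 12 else "\n"))
--     out.append("};\n")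
--     return "".join(out)
-- ===== Notes on version B (the rewrite author's own statement) =====
-- stated objective: simpler
-- what changed: Replaces A's single-pass accumulate-and-flush loop (index-modulo test, mutable pending buffer, post-loop flush) with a two-pass decomposition: first format all bytes, then slice the list into 12-wide chunks and emit one line per chunk, keying the trailing comma off the chunk length.
import Mathlib
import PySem

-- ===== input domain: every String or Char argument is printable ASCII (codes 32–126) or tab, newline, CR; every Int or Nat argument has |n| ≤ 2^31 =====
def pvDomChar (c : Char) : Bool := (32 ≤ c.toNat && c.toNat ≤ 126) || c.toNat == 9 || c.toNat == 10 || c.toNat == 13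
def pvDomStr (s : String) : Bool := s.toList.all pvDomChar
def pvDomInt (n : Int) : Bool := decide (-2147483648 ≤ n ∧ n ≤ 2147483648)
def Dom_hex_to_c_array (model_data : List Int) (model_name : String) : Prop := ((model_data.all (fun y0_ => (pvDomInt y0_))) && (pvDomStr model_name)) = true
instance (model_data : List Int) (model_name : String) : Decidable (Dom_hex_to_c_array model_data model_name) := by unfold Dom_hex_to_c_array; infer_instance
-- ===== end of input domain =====

-- B replaces A's single-pass accumulate-and-flush loop with a two-pass build-then-chunk
-- decomposition (format everything, then slice into 12-wide lines); objective: simpler.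

-- ===== PORT A =====
-- f"0x{val:02x}" = '0x' ++ format(val, '02x'); for val < 0 Python prints '-' ++ hex digits of
-- |val| (already width ≥ 2, so the zero-pad never fires); exact on all Int.
def pyHex02 (val : Int) : String :=
  if val < 0 then "0x-" ++ String.ofList (Nat.toDigits 16 val.natAbs)
  else "0x" ++ (if val.natAbs < 16 then "0" else "") ++ String.ofList (Nat.toDigits 16 val.natAbs)

def joinS (arr : List String) : String := PySem.Str.join ", " arr

-- the body of A's `for i, val in enumerate(model_data)` loop, state = (c_str, hex_array)
def aStep (st : String × List String) (p : Int × Int) : String × List String :=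
  let hex_array := st.2 ++ [pyHex02 p.2]
  if PySem.Int.mod (p.1 + 1) 12 = 0 then
    (st.1 ++ "  " ++ joinS hex_array ++ ",\n", [])
  else (st.1, hex_array)

-- A's post-loop `if hex_array:` flush
def aFin (st : String × List String) : String :=
  if st.2 = [] then st.1 else st.1 ++ "  " ++ joinS st.2 ++ "\n"

def hex_to_c_array (model_data : List Int) (model_name : String) : String :=
  aFin ((PySem.List.enumerate model_data 0).foldl aStep
    ("" ++ "#include <cstdint>\n\n"
      ++ ("unsigned int " ++ model_name ++ "_len = " ++ PySem.Int.toStr (PySem.List.len model_data) ++ ";\n")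
      ++ ("unsigned char " ++ model_name ++ "[] = {\n"), [])) ++ "};\n"

-- ===== PORT B =====
-- B's `for i in range(0, len(hexes), 12)` loop: each iteration takes hexes[i:i+12] and moves on 12
def bChunks : List String → String
  | [] => ""
  | h :: t =>
    let chunk := List.take 12 (h :: t)
    "  " ++ joinS chunk ++ (if chunk.length = 12 then ",\n" else "\n") ++ bChunks (t.drop 11)
  termination_by l => l.length
  decreasing_by simp

def hex_to_c_array_alt (model_data : List Int) (model_name : String) : String :=
  "#include <cstdint>\n\n"
    ++ ("unsigned int " ++ model_name ++ "_len = " ++ PySem.Int.toStr (PySem.List.len model_data) ++ ";\n")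
    ++ ("unsigned char " ++ model_name ++ "[] = {\n")
    ++ bChunks (model_data.map pyHex02) ++ "};\n"

-- ===== PRECONDITION & SPEC =====
def Spec_hex_to_c_array (model_data : List Int) (model_name : String) (out : String) : Prop := out = hex_to_c_array_alt model_data model_name
instance (model_data : List Int) (model_name : String) (out : String) : Decidable (Spec_hex_to_c_array model_data model_name out) := by unfold Spec_hex_to_c_array; infer_instance

-- ===== CLAIM (what is proved, stated in full; the proofs are below) =====
def Claim_equal_hex_to_c_array : Prop := ∀ (model_data : List Int) (model_name : String), Dom_hex_to_c_array model_data model_name → Spec_hex_to_c_array model_data model_name (hex_to_c_array model_data model_name)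

-- ===== LEMMAS AND PROOFS =====

-- intermediate form of the output tail: A's loop with a pending partial line `arr` accumulated
def bFill (arr : List String) : List String → String
  | [] => if arr = [] then "" else "  " ++ joinS arr ++ "\n"
  | h :: t =>
    if arr.length = 11 then "  " ++ joinS (arr ++ [h]) ++ ",\n" ++ bFill [] t
    else bFill (arr ++ [h]) t

theorem fold_eq_fill : ∀ (xs : List Int) (arr : List String) (s : String) (i : Int),
    0 ≤ i → PySem.Int.mod i 12 = arr.length → arr.length < 12 →
    aFin ((PySem.List.enumerate xs i).foldl aStep (s, arr)) = s ++ bFill arr (xs.map pyHex02) := by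
  intro xs
  induction xs with
  | nil =>
    intro arr s i _ _ _
    simp only [PySem.List.enumerate_nil, List.foldl_nil, List.map_nil, aFin, bFill]
    split
    · simp
    · simp only [String.append_assoc]
  | cons x xs ih =>
    intro arr s i hi hmod hlt
    have h12 : (0:Int) < 12 := by norm_num
    rw [PySem.Int.mod_eq_emod_of_pos h12] at hmod
    simp only [PySem.List.enumerate_cons, List.foldl_cons, List.map_cons, aStep]
    by_cases h11 : arr.length = 11
    · have hc : PySem.Int.mod (i + 1) 12 = 0 := by
        rw [PySem.Int.mod_eq_emod_of_pos h12]; omega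
      rw [if_pos hc]
      rw [ih [] _ (i + 1) (by omega)
        (by rw [PySem.Int.mod_eq_emod_of_pos h12]; simp; omega) (by simp)]
      simp only [bFill, if_pos h11, String.append_assoc]
    · have hc : ¬ PySem.Int.mod (i + 1) 12 = 0 := by
        rw [PySem.Int.mod_eq_emod_of_pos h12]; omega
      rw [if_neg hc]
      rw [ih (arr ++ [pyHex02 x]) _ (i + 1) (by omega)
        (by rw [PySem.Int.mod_eq_emod_of_pos h12]; simp; omega)
        (by simp; omega)]
      simp only [bFill, if_neg h11]

theorem fill_short : ∀ (hs arr : List String), arr.length + hs.length < 12 →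
    bFill arr hs = if arr ++ hs = [] then "" else "  " ++ joinS (arr ++ hs) ++ "\n" := by
  intro hs
  induction hs with
  | nil => intro arr _; simp [bFill]
  | cons h t ih =>
    intro arr hlen
    have h11 : ¬ arr.length = 11 := by simp at hlen; omega
    simp only [bFill, if_neg h11]
    rw [ih (arr ++ [h]) (by simp at hlen ⊢; omega)]
    simp

theorem fill_full : ∀ (c rest arr : List String), arr.length < 12 → arr.length + c.length = 12 →
    bFill arr (c ++ rest) = "  " ++ joinS (arr ++ c) ++ (",\n" ++ bFill [] rest) := by
  intro c
  induction c with
  | nil => intro rest arr h1 h2; simp at h2; omega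
  | cons h t ih =>
    intro rest arr h1 h2
    by_cases h11 : arr.length = 11
    · have ht : t = [] := by simp at h2; exact List.eq_nil_of_length_eq_zero (by omega)
      subst ht
      simp only [List.nil_append, List.cons_append, bFill, if_pos h11, String.append_assoc]
    · simp only [List.cons_append, bFill, if_neg h11]
      rw [ih rest (arr ++ [h]) (by simp at h2 ⊢; omega) (by simp at h2 ⊢; omega)]
      simp

theorem bChunks_nil : bChunks [] = "" := by rw [bChunks]

theorem bChunks_cons (h : String) (t : List String) :
    bChunks (h :: t) = "  " ++ joinS (List.take 12 (h :: t))
      ++ (if (List.take 12 (h :: t)).length = 12 then ",\n" else "\n") ++ bChunks (t.drop 11) := by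
  rw [bChunks]

theorem fill_eq_chunks (hs : List String) : bFill [] hs = bChunks hs := by
  have H : ∀ (n : Nat) (hs : List String), hs.length ≤ n → bFill [] hs = bChunks hs := by
    intro n
    induction n with
    | zero =>
      intro hs h
      have : hs = [] := List.eq_nil_of_length_eq_zero (by omega)
      subst this; rw [bChunks_nil]; simp [bFill]
    | succ n ih =>
      intro hs hlen
      match hs with
      | [] => rw [bChunks_nil]; simp [bFill]
      | h :: t =>
        have hlen' : t.length + 1 ≤ n + 1 := by simpa using hlen
        rw [bChunks_cons]
        by_cases hbig : 12 ≤ t.length + 1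
        · have htake : (List.take 12 (h :: t)).length = 12 := by
            simp only [List.length_take, List.length_cons]; omega
          have hdl : (List.drop 12 (h :: t)).length ≤ n := by
            simp only [List.length_drop, List.length_cons]; omega
          conv_lhs => rw [show h :: t = List.take 12 (h :: t) ++ List.drop 12 (h :: t) from
            (List.take_append_drop 12 (h :: t)).symm]
          rw [fill_full _ _ [] (by simp) (by simpa using htake)]
          rw [show t.drop 11 = List.drop 12 (h :: t) from rfl, ih _ hdl, if_pos htake]
          simp only [List.nil_append, String.append_assoc]
        · have hsm : t.length + 1 < 12 := by omega
          rw [fill_short _ [] (by simpa using hsm)]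
          have htake : List.take 12 (h :: t) = h :: t := List.take_of_length_le (by simp; omega)
          have hdrop : t.drop 11 = [] := List.drop_eq_nil_of_le (by omega)
          rw [hdrop, bChunks_nil, htake, if_neg (show ¬ (h :: t).length = 12 by simp; omega)]
          simp [String.append_assoc]
  exact H hs.length hs le_rfl

-- ===== VERDICT (by name: the statement is the Claim_ definition above) =====
theorem hex_to_c_array_spec : Claim_equal_hex_to_c_array := by
  intro model_data model_name _
  unfold Spec_hex_to_c_array hex_to_c_array hex_to_c_array_alt
  rw [fold_eq_fill model_data [] _ 0 le_rfl (by decide) (by decide), fill_eq_chunks]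
  simp [String.append_assoc]
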